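-- pv_equiv track=rewrite | github.com/SafiaK/UKTerritorialDisambiguation | disambiguationAnalysis.py | _cluster_nearby_entities
-- ===== SOURCE A (Python) =====
-- from typing import Dict, List, Optional, Tuple, Set
--
-- def _cluster_nearby_entities(entities: List[Tuple], doc) -> List[List[Tuple]]:
--     """Cluster territorial entities that appear near each other"""
--     clusters = []
--     used_entities = set()
--
--     for i, entity in enumerate(entities):
--         if i in used_entities:
--             continue
--
--         cluster = [entity]
--         used_entities.add(i)
--
--         # Find nearby entities (within 100 characters)
--         for j, other_entity in enumerate(entities[i+1:], i+1):
--             if j in used_entities: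
--                 continue
--             if abs(entity[2] - other_entity[2]) < 100:  # Within 100 chars
--                 cluster.append(other_entity)
--                 used_entities.add(j)
--
--         if len(cluster) > 0:
--             clusters.append(cluster)
--
--     return clusters
-- ===== SOURCE B (Python) =====
-- def _cluster_nearby_entities(entities, doc):
--     """Cluster territorial entities that appear near each other.
--     Worklist version: repeatedly take the first remaining entity as a seed and
--     partition the rest into its cluster (within 100 chars) and the far remainder."""
--     clusters = []
--     remaining = list(entities)
--     while remaining:
--         seed = remaining[0]
--         rest = remaining[1:]
--         near = [e for e in rest if abs(seed[2] - e[2]) < 100]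
--         far = [e for e in rest if not abs(seed[2] - e[2]) < 100]
--         clusters.append([seed] + near)
--         remaining = far
--     return clusters
-- ===== Notes on version B (the rewrite author's own statement) =====
-- stated objective: simpler
-- what changed: Replaces the index-based nested loops with a used-index set by a worklist that partitions the remaining entities into the seed's cluster and the far remainder, so no used set and no index bookkeeping remain.
import Mathlib
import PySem

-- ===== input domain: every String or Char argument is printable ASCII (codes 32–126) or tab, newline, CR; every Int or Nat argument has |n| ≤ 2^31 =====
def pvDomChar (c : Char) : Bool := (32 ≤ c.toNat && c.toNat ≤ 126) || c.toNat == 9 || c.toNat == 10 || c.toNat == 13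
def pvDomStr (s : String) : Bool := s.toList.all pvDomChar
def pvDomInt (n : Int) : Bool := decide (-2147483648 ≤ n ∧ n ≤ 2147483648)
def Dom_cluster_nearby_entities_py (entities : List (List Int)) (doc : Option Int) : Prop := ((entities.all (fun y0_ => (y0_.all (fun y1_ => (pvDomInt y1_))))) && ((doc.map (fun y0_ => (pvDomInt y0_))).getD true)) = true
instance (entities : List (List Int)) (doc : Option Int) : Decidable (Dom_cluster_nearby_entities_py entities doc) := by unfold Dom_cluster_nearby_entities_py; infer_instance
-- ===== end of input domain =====

-- B replaces A's nested index loops over the full suffix with a used-index set by a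
-- worklist that partitions the remaining entities per seed (simpler; same results).

-- entity[2]; total form: Pre_ guarantees the index is in range wherever Python evaluates it
def pvPos (e : List Int) : Int := PySem.List.pyGetD e 2 0

-- ===== PORT A =====
-- body of the inner loop: for j, other_entity in enumerate(entities[i+1:], i+1): …
def iStepA (entity : List Int) (st2 : List (List Int) × PySem.Set Int) (q : Int × List Int) :
    List (List Int) × PySem.Set Int :=
  if PySem.Set.contains st2.2 q.1 then st2
  else if |pvPos entity - pvPos q.2| < 100 then (st2.1 ++ [q.2], PySem.Set.add st2.2 q.1)
  else st2

-- body of the outer loop: for i, entity in enumerate(entities): …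
def oStepA (entities : List (List Int)) (st : List (List (List Int)) × PySem.Set Int)
    (p : Int × List Int) : List (List (List Int)) × PySem.Set Int :=
  if PySem.Set.contains st.2 p.1 then st
  else
    let inner := (PySem.List.enumerate (PySem.List.slice entities (some (p.1 + 1)) none) (p.1 + 1)).foldl
      (iStepA p.2) ([p.2], PySem.Set.add st.2 p.1)
    if inner.1.length > 0 then (st.1 ++ [inner.1], inner.2) else (st.1, inner.2)

def cluster_nearby_entities_py (entities : List (List Int)) (doc : Option Int) : List (List (List Int)) :=
  ((PySem.List.enumerate entities 0).foldl (oStepA entities) ([], PySem.Set.empty)).1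

-- ===== PORT B =====
def altGo : List (List Int) → List (List (List Int))
  | [] => []
  | seed :: rest =>
    let near := rest.filter (fun e => |pvPos seed - pvPos e| < 100)
    let far := rest.filter (fun e => ¬ |pvPos seed - pvPos e| < 100)
    (seed :: near) :: altGo far
  termination_by l => l.length
  decreasing_by
    simp only [List.length_cons, List.length_unattach]
    exact Nat.lt_succ_of_le (le_trans (List.length_filter_le _ _) (by simp))

def cluster_nearby_entities_py_alt (entities : List (List Int)) (doc : Option Int) : List (List (List Int)) :=
  altGo entities

-- ===== PRECONDITION & SPEC =====
-- A indexes entity[2] for every entity as soon as the list has at least two elements;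
-- Pre_ excludes exactly the inputs where that raises IndexError.
def Pre_cluster_nearby_entities_py (entities : List (List Int)) (doc : Option Int) : Prop :=
  entities.length ≤ 1 ∨ ∀ e ∈ entities, 3 ≤ e.length
instance (entities : List (List Int)) (doc : Option Int) : Decidable (Pre_cluster_nearby_entities_py entities doc) := by unfold Pre_cluster_nearby_entities_py; infer_instance

def pvWitness_cluster_nearby_entities_py : List (List Int) × Option Int :=
  ([[1, 2, 10], [3, 4, 50], [5, 6, 400]], none)

def Spec_cluster_nearby_entities_py (entities : List (List Int)) (doc : Option Int) (out : List (List (List Int))) : Prop := out = cluster_nearby_entities_py_alt entities doc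
instance (entities : List (List Int)) (doc : Option Int) (out : List (List (List Int))) : Decidable (Spec_cluster_nearby_entities_py entities doc out) := by unfold Spec_cluster_nearby_entities_py; infer_instance

-- ===== CLAIM (what is proved, stated in full; the proofs are below) =====
def Claim_equal_cluster_nearby_entities_py : Prop := ∀ (entities : List (List Int)) (doc : Option Int), Dom_cluster_nearby_entities_py entities doc → Pre_cluster_nearby_entities_py entities doc → Spec_cluster_nearby_entities_py entities doc (cluster_nearby_entities_py entities doc)

-- ===== LEMMAS AND PROOFS =====

theorem altGo_cons (seed : List Int) (rest : List (List Int)) :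
    altGo (seed :: rest) = (seed :: rest.filter (fun e => |pvPos seed - pvPos e| < 100))
      :: altGo (rest.filter (fun e => ¬ |pvPos seed - pvPos e| < 100)) := by
  rw [altGo]

-- the inner loop's proximity test, as the Bool the ports branch on
def nearQ (ent : List Int) (q : Int × List Int) : Bool := decide (|pvPos ent - pvPos q.2| < 100)

theorem pv_contains_eq (s : PySem.Set Int) (x : Int) :
    PySem.Set.contains s x = decide (x ∈ s) := by
  simp [PySem.Set.contains]

theorem pv_contains_add (s : PySem.Set Int) (x y : Int) :
    PySem.Set.contains (PySem.Set.add s x) y = (PySem.Set.contains s y || decide (y = x)) := by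
  simp [PySem.Set.mem_add]

theorem pv_contains_add_ne (s : PySem.Set Int) (x y : Int) (h : y ≠ x) :
    PySem.Set.contains (PySem.Set.add s x) y = PySem.Set.contains s y := by
  simp [pv_contains_add, h]

theorem pv_enumerate_drop (xs : List (List Int)) (n : Nat) (s : Int) :
    PySem.List.enumerate (xs.drop n) (s + n) = (PySem.List.enumerate xs s).drop n := by
  induction xs generalizing n s with
  | nil => simp [PySem.List.enumerate]
  | cons x xs ih =>
    cases n with
    | zero => simp
    | succ m =>
      simp only [List.drop_succ_cons, PySem.List.enumerate_cons]
      have : s + ((m + 1 : Nat) : Int) = (s + 1) + (m : Int) := by push_cast; ring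
      rw [this, ih]

theorem pv_inner_spec (ent : List Int) (T : List (Int × List Int))
    (c0 : List (List Int)) (U0 : PySem.Set Int)
    (hnd : T.Pairwise (fun p q => p.1 ≠ q.1)) :
    T.foldl (iStepA ent) (c0, U0) =
      (c0 ++ (T.filter (fun q => !PySem.Set.contains U0 q.1 && nearQ ent q)).map Prod.snd,
       (T.filter (fun q => !PySem.Set.contains U0 q.1 && nearQ ent q)).foldl
         (fun u q => PySem.Set.add u q.1) U0) := by
  induction T generalizing c0 U0 with
  | nil => simp
  | cons q T ih =>
    rw [List.pairwise_cons] at hnd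
    obtain ⟨hq, hnd'⟩ := hnd
    by_cases hc : PySem.Set.contains U0 q.1 = true
    · simp only [List.foldl_cons, List.filter_cons, iStepA, hc, if_pos, Bool.not_true,
        Bool.false_and, if_neg, Bool.false_eq_true, not_false_iff, ite_true]
      exact ih c0 U0 hnd'
    · have hmem : q.1 ∉ U0 := by simpa [pv_contains_eq] using hc
      by_cases hn : nearQ ent q = true
      · have hstep : iStepA ent (c0, U0) q = (c0 ++ [q.2], PySem.Set.add U0 q.1) := by
          simp only [iStepA, hc]
          simp only [nearQ, decide_eq_true_eq] at hn
          simp [hn]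
        have hcong : T.filter (fun r => !PySem.Set.contains (PySem.Set.add U0 q.1) r.1 && nearQ ent r)
            = T.filter (fun r => !PySem.Set.contains U0 r.1 && nearQ ent r) :=
          List.filter_congr (fun r hr => by rw [pv_contains_add_ne _ _ _ (Ne.symm (hq r hr))])
        simp only [List.foldl_cons, hstep, List.filter_cons]
        rw [ih _ _ hnd', hcong]
        simp [hc, hn, hmem]
      · have hstep : iStepA ent (c0, U0) q = (c0, U0) := by
          simp only [iStepA, hc]
          simp only [nearQ, decide_eq_true_eq] at hn
          simp [hn]
        simp only [List.foldl_cons, hstep, List.filter_cons]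
        rw [ih _ _ hnd']
        simp [hc, hn, hmem]

theorem pv_contains_foldl_add (L : List (Int × List Int)) (U : PySem.Set Int) (j : Int) :
    PySem.Set.contains (L.foldl (fun u q => PySem.Set.add u q.1) U) j
      = (PySem.Set.contains U j || L.any (fun r => decide (r.1 = j))) := by
  induction L generalizing U with
  | nil => simp
  | cons q L ih =>
    simp only [List.foldl_cons, List.any_cons, ih, pv_contains_add]
    by_cases h : q.1 = j
    · simp [h]
    · have h2 : j ≠ q.1 := fun e => h e.symm
      simp [h, h2]

theorem pv_any_filter_eq (T : List (Int × List Int)) (P : Int × List Int → Bool)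
    (q : Int × List Int) (hq : q ∈ T) (hnd : T.Pairwise (fun a b => a.1 ≠ b.1)) :
    (T.filter P).any (fun r => decide (r.1 = q.1)) = P q := by
  induction T with
  | nil => simp at hq
  | cons a T ih =>
    rw [List.pairwise_cons] at hnd
    obtain ⟨ha, hnd'⟩ := hnd
    rcases List.mem_cons.mp hq with rfl | hq'
    · have : (T.filter P).any (fun r => decide (r.1 = q.1)) = false := by
        rw [List.any_eq_false]
        intro r hr
        have := ha r (List.mem_of_mem_filter hr)
        simp [Ne.symm this]
      by_cases hP : P q = true <;> simp [hP, this]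
    · have hne : a.1 ≠ q.1 := ha q hq'
      by_cases hP : P a = true <;> simp [hP, hne, ih hq' hnd']

theorem pv_outer_spec (n : Nat) (entities : List (List Int)) (k : Nat)
    (cl : List (List (List Int))) (U : PySem.Set Int)
    (hn : entities.length - k ≤ n) :
    (((PySem.List.enumerate entities 0).drop k).foldl (oStepA entities) (cl, U)).1
      = cl ++ altGo ((((PySem.List.enumerate entities 0).drop k).filter
          (fun p => !PySem.Set.contains U p.1)).map Prod.snd) := by
  induction n generalizing k cl U with
  | zero =>
    have hk : entities.length ≤ k := by omega
    have : (PySem.List.enumerate entities 0).drop k = [] := by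
      rw [List.drop_eq_nil_iff]
      simpa [PySem.List.length_enumerate] using hk
    simp [this, altGo]
  | succ n ih =>
    by_cases hk : k < entities.length
    · have hkE : k < (PySem.List.enumerate entities 0).length := by
        simpa [PySem.List.length_enumerate] using hk
      have hdrop : (PySem.List.enumerate entities 0).drop k
          = ((k : Int), entities[k]) :: (PySem.List.enumerate entities 0).drop (k + 1) := by
        rw [List.drop_eq_getElem_cons hkE, PySem.List.getElem_enumerate]
        simp
      set ent := entities[k] with hent
      set T := (PySem.List.enumerate entities 0).drop (k + 1) with hT
      have hpwT : T.Pairwise (fun p q => p.1 < q.1) :=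
        (PySem.List.pairwise_lt_enumerate entities 0).drop
      have hndT : T.Pairwise (fun p q => p.1 ≠ q.1) := hpwT.imp (fun h => ne_of_lt h)
      have hgt : ∀ q ∈ T, (k : Int) < q.1 := by
        have := (PySem.List.pairwise_lt_enumerate entities 0).drop (i := k)
        rw [hdrop, List.pairwise_cons] at this
        exact fun q hq => this.1 q hq
      by_cases hc : PySem.Set.contains U (k : Int) = true
      · rw [hdrop]
        have hstep : oStepA entities (cl, U) ((k : Int), ent) = (cl, U) := by
          unfold oStepA; rw [if_pos hc]
        rw [List.foldl_cons, hstep, List.filter_cons_of_neg (by simpa [pv_contains_eq] using hc)]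
        exact ih (k + 1) cl U (by omega)
      · -- head becomes a seed
        have hinnerlist : PySem.List.enumerate (PySem.List.slice entities (some ((k : Int) + 1)) none)
            ((k : Int) + 1) = T := by
          have h1 : ((k : Int) + 1) = ((k + 1 : Nat) : Int) := by push_cast; ring
          rw [h1, PySem.List.slice_from_natCast]
          have := pv_enumerate_drop entities (k + 1) 0
          simpa using this
        set N := T.filter (fun q => !PySem.Set.contains U q.1 && nearQ ent q) with hN
        have hcongN : T.filter (fun q => !PySem.Set.contains (PySem.Set.add U (k : Int)) q.1 && nearQ ent q) = N :=
          List.filter_congr (fun q hq => by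
            rw [pv_contains_add_ne _ _ _ (ne_of_gt (hgt q hq))])
        have hUF : ∀ q ∈ T,
            PySem.Set.contains (N.foldl (fun u q => PySem.Set.add u q.1) (PySem.Set.add U (k : Int))) q.1
              = (PySem.Set.contains U q.1 || (!PySem.Set.contains U q.1 && nearQ ent q)) := by
          intro q hq
          rw [pv_contains_foldl_add, pv_contains_add_ne _ _ _ (ne_of_gt (hgt q hq)), hN,
            pv_any_filter_eq T _ q hq hndT]
        have hstep : oStepA entities (cl, U) ((k : Int), ent)
            = (cl ++ [ent :: N.map Prod.snd],
               N.foldl (fun u q => PySem.Set.add u q.1) (PySem.Set.add U (k : Int))) := by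
          simp only [oStepA, hc, Bool.false_eq_true, if_neg, not_false_iff, hinnerlist]
          rw [pv_inner_spec ent T [ent] (PySem.Set.add U (k : Int)) hndT, hcongN]
          simp
        rw [hdrop]
        simp only [List.foldl_cons, hstep]
        rw [ih (k + 1) _ _ (by omega)]
        -- rewrite the used-set filter after this step into the far partition
        have hfar : T.filter (fun p => !PySem.Set.contains
              (N.foldl (fun u q => PySem.Set.add u q.1) (PySem.Set.add U (k : Int))) p.1)
            = T.filter (fun q => !PySem.Set.contains U q.1 && !nearQ ent q) :=
          List.filter_congr (fun q hq => by
            rw [hUF q hq]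
            cases hu : PySem.Set.contains U q.1 <;> cases hn : nearQ ent q <;> simp)
        rw [hfar]
        -- now compute the B side
        rw [List.filter_cons_of_pos (by simpa [pv_contains_eq] using hc), List.map_cons, altGo_cons,
          List.filter_map, List.filter_map, List.filter_filter, List.filter_filter]
        simp only [List.append_assoc, List.cons_append, List.nil_append]
        have h1 : List.filter (fun a => ((fun e => decide (|pvPos ent - pvPos e| < 100)) ∘ Prod.snd) a && !PySem.Set.contains U a.1) T = N := by
          rw [hN]
          apply List.filter_congr
          intro q hq
          simp [nearQ, Function.comp, Bool.and_comm]
        have h2 : List.filter (fun a => ((fun e => decide ¬|pvPos ent - pvPos e| < 100) ∘ Prod.snd) a && !PySem.Set.contains U a.1) T = List.filter (fun q => !PySem.Set.contains U q.1 && !nearQ ent q) T := by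
          apply List.filter_congr
          intro q hq
          simp only [nearQ, Function.comp, Bool.and_comm, decide_not]
        rw [h1, h2]
    · have : (PySem.List.enumerate entities 0).drop k = [] := by
        rw [List.drop_eq_nil_iff]
        simp [PySem.List.length_enumerate]; omega
      simp [this, altGo]

-- ===== VERDICT (by name: the statement is the Claim_ definition above) =====
theorem cluster_nearby_entities_py_spec : Claim_equal_cluster_nearby_entities_py := by
  intro entities doc _ _
  show cluster_nearby_entities_py entities doc = cluster_nearby_entities_py_alt entities doc
  unfold cluster_nearby_entities_py cluster_nearby_entities_py_alt
  have h := pv_outer_spec entities.length entities 0 [] PySem.Set.empty (by omega)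
  simp only [List.drop_zero] at h
  rw [h]
  have : (PySem.List.enumerate entities 0).filter
      (fun p => !PySem.Set.contains PySem.Set.empty p.1) = PySem.List.enumerate entities 0 := by
    apply List.filter_eq_self.mpr
    intro p _
    simp [PySem.Set.contains, PySem.Set.empty]
  rw [this]
  simp [PySem.List.map_snd_enumerate]
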